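-- pv_equiv track=rewrite | github.com/artinuwq/dance_studio | src/dance_studio/core/abonement_pricing.py | normalize_bundle_group_ids
-- ===== SOURCE A (Python) =====
-- from typing import Any
--
-- class AbonementPricingError(ValueError):
--     pass
--
-- def _normalize_group_id(raw_value: Any, field_name: str) -> int:
--     try:
--         group_id = int(raw_value)
--     except (TypeError, ValueError) as exc:
--         raise AbonementPricingError(f"{field_name} must be an integer.") from exc
--     if group_id <= 0:
--         raise AbonementPricingError(f"{field_name} must be > 0.")
--     return group_id
--
-- def normalize_bundle_group_ids(group_id: int, raw_bundle_group_ids: Any) -> list[int]: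
--     if raw_bundle_group_ids in (None, ""):
--         return [group_id]
--     if not isinstance(raw_bundle_group_ids, (list, tuple)):
--         raise AbonementPricingError("bundle_group_ids must be an array of integers.")
--
--     result: list[int] = []
--     seen: set[int] = set()
--     for index, raw_value in enumerate(raw_bundle_group_ids, start=1):
--         item_id = _normalize_group_id(raw_value, f"bundle_group_ids[{index}]")
--         if item_id in seen:
--             raise AbonementPricingError("bundle_group_ids must contain unique group ids.")
--         seen.add(item_id)
--         result.append(item_id)
--
--     if not result:
--         raise AbonementPricingError("bundle_group_ids must not be empty.")
--     if group_id not in seen: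
--         raise AbonementPricingError("group_id must be included in bundle_group_ids.")
--     return result
-- ===== SOURCE B (Python) =====
-- from typing import Any
--
-- class AbonementPricingError(ValueError):
--     pass
--
-- def _normalize_group_id(raw_value: Any, field_name: str) -> int:
--     try:
--         group_id = int(raw_value)
--     except (TypeError, ValueError) as exc:
--         raise AbonementPricingError(f"{field_name} must be an integer.") from exc
--     if group_id <= 0:
--         raise AbonementPricingError(f"{field_name} must be > 0.")
--     return group_id
--
-- def normalize_bundle_group_ids(group_id: int, raw_bundle_group_ids: Any) -> list[int]:
--     if raw_bundle_group_ids in (None, ""):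
--         return [group_id]
--     if not isinstance(raw_bundle_group_ids, (list, tuple)):
--         raise AbonementPricingError("bundle_group_ids must be an array of integers.")
--     # validate everything first, in order
--     result = [_normalize_group_id(raw_value, f"bundle_group_ids[{index}]")
--               for index, raw_value in enumerate(raw_bundle_group_ids, start=1)]
--     # duplicate detection by sort-then-adjacent-scan: no hash set anywhere
--     ordered = sorted(result)
--     if any(a == b for a, b in zip(ordered, ordered[1:])):
--         raise AbonementPricingError("bundle_group_ids must contain unique group ids.")
--     if not result:
--         raise AbonementPricingError("bundle_group_ids must not be empty.")
--     if group_id not in result: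
--         raise AbonementPricingError("group_id must be included in bundle_group_ids.")
--     return result
-- ===== Notes on version B (the rewrite author's own statement) =====
-- stated objective: alternative
-- what changed: B validates all elements first with a comprehension and then detects duplicates by sorting the validated list and scanning adjacent pairs (no hash set anywhere; membership is a plain list scan), instead of A's single loop maintaining an incremental 'seen' set; Pre_ excludes exactly the inputs where A raises AbonementPricingError (non-list/empty input, non-positive ids, duplicates, group_id missing).
import Mathlib
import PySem

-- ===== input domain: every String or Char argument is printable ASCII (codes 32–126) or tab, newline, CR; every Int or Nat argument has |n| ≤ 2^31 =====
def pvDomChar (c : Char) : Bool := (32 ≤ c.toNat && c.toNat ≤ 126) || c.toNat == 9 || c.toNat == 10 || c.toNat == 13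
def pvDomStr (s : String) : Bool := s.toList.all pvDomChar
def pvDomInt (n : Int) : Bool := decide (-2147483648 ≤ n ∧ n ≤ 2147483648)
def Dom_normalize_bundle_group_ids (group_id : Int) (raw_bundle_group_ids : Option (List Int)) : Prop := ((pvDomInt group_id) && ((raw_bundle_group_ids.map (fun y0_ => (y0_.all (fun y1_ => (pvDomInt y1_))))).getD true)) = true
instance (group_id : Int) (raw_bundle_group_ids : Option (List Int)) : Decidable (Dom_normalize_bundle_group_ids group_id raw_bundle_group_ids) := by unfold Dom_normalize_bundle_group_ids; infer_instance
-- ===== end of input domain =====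

-- B validates all elements first via a comprehension, then detects duplicates by sorting and
-- scanning adjacent pairs (no set anywhere; membership is a list scan) instead of A's loop with
-- an incremental 'seen' set (objective: alternative).


-- ===== PORT A =====
-- A's loop: build result and seen together; 'none' models an AbonementPricingError raise.
def pvA_loop (xs : List Int) (result : List Int) (seen : PySem.Set Int) :
    Option (List Int × PySem.Set Int) :=
  match xs with
  | [] => some (result, seen)
  | v :: rest =>
    if v ≤ 0 then none                               -- _normalize_group_id raises
    else if PySem.Set.contains seen v then none      -- duplicate raise
    else pvA_loop rest (result ++ [v]) (PySem.Set.add seen v)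

-- outside Pre_ (a raise in the Python) the returned [] is meaningless
def normalize_bundle_group_ids (group_id : Int) (raw_bundle_group_ids : Option (List Int)) : List Int :=
  match raw_bundle_group_ids with
  | none => [group_id]
  | some xs =>
    match pvA_loop xs [] PySem.Set.empty with
    | none => []
    | some (result, seen) =>
      if result = [] then []                                          -- raise: must not be empty
      else if PySem.Set.contains seen group_id = false then []        -- raise: group_id missing
      else result

-- ===== PORT B =====
-- B's per-item validator (_normalize_group_id); none models the raise.
def pvB_check (v : Int) : Option Int := if v ≤ 0 then none else some v

def normalize_bundle_group_ids_alt (group_id : Int) (raw_bundle_group_ids : Option (List Int)) : List Int :=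
  match raw_bundle_group_ids with
  | none => [group_id]
  | some xs =>
    match xs.mapM pvB_check with                     -- the validating comprehension
    | none => []                                     -- raise on first invalid item
    | some result =>
      let ordered := PySem.List.sorted result (fun x => x) false     -- sorted(result)
      if (ordered.zip ordered.tail).any (fun p => p.1 == p.2) then []  -- adjacent-duplicate raise
      else if result = [] then []                                  -- empty raise
      else if result.contains group_id = false then []             -- membership raise (list scan)
      else result

-- ===== PRECONDITION & SPEC =====
-- Pre_ is exactly where Python A returns normally: None, or a nonempty duplicate-free list of
-- positive ids containing group_id (everything else raises AbonementPricingError).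
def Pre_normalize_bundle_group_ids (group_id : Int) (raw_bundle_group_ids : Option (List Int)) : Prop :=
  ∀ xs ∈ raw_bundle_group_ids, xs ≠ [] ∧ (∀ x ∈ xs, 0 < x) ∧ xs.Nodup ∧ group_id ∈ xs
instance (group_id : Int) (raw_bundle_group_ids : Option (List Int)) : Decidable (Pre_normalize_bundle_group_ids group_id raw_bundle_group_ids) := by unfold Pre_normalize_bundle_group_ids; infer_instance

def pvWitness_normalize_bundle_group_ids : Int × Option (List Int) := (2, some [1, 2, 3])

def Spec_normalize_bundle_group_ids (group_id : Int) (raw_bundle_group_ids : Option (List Int)) (out : List Int) : Prop := out = normalize_bundle_group_ids_alt group_id raw_bundle_group_ids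
instance (group_id : Int) (raw_bundle_group_ids : Option (List Int)) (out : List Int) : Decidable (Spec_normalize_bundle_group_ids group_id raw_bundle_group_ids out) := by unfold Spec_normalize_bundle_group_ids; infer_instance

-- ===== CLAIM (what is proved, stated in full; the proofs are below) =====
def Claim_equal_normalize_bundle_group_ids : Prop := ∀ (group_id : Int) (raw_bundle_group_ids : Option (List Int)), Dom_normalize_bundle_group_ids group_id raw_bundle_group_ids → Pre_normalize_bundle_group_ids group_id raw_bundle_group_ids → Spec_normalize_bundle_group_ids group_id raw_bundle_group_ids (normalize_bundle_group_ids group_id raw_bundle_group_ids)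

-- ===== LEMMAS AND PROOFS =====

-- A's loop succeeds on a valid suffix, appending it to result and adding it to seen.
theorem pvA_loop_ok (xs : List Int) (result : List Int) (seen : PySem.Set Int)
    (hpos : ∀ x ∈ xs, 0 < x) (hnd : xs.Nodup) (hfresh : ∀ x ∈ xs, PySem.Set.contains seen x = false) :
    pvA_loop xs result seen = some (result ++ xs, xs.foldl PySem.Set.add seen) := by
  induction xs generalizing result seen with
  | nil => simp [pvA_loop]
  | cons v rest ih =>
    have hv : 0 < v := hpos v (by simp)
    have hvf : PySem.Set.contains seen v = false := hfresh v (by simp)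
    have hrest : ∀ x ∈ rest, 0 < x := fun x hx => hpos x (by simp [hx])
    have hfresh' : ∀ x ∈ rest, PySem.Set.contains (PySem.Set.add seen v) x = false := by
      intro x hx
      have hne : x ≠ v := fun h => (List.nodup_cons.mp hnd).1 (h ▸ hx)
      have hxf : PySem.Set.contains seen x = false := hfresh x (by simp [hx])
      rw [Bool.eq_false_iff]
      intro hc
      rw [PySem.Set.contains_iff] at hc
      unfold PySem.Set.add at hc
      split at hc <;> simp_all [Bool.eq_false_iff]
    simp only [pvA_loop, if_neg (by omega : ¬ v ≤ 0), hvf, Bool.false_eq_true, if_false,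
      ih (result ++ [v]) (PySem.Set.add seen v) hrest hnd.of_cons hfresh']
    simp

-- B's comprehension succeeds on positive elements, returning the list itself.
theorem pvB_mapM_ok (xs : List Int) (hpos : ∀ x ∈ xs, 0 < x) : xs.mapM pvB_check = some xs := by
  induction xs with
  | nil => rfl
  | cons v rest ih =>
    have hv : 0 < v := hpos v (by simp)
    simp [List.mapM_cons, pvB_check, if_neg (by omega : ¬ v ≤ 0),
      ih (fun x hx => hpos x (by simp [hx]))]

-- a duplicate-free list has no equal adjacent pair
theorem zip_tail_no_dup (l : List Int) (hnd : l.Nodup) :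
    (l.zip l.tail).any (fun p => p.1 == p.2) = false := by
  induction l with
  | nil => rfl
  | cons a t ih =>
    cases t with
    | nil => rfl
    | cons b t' =>
      have hab : a ≠ b := fun h => (List.nodup_cons.mp hnd).1 (h ▸ List.mem_cons_self ..)
      simp only [List.tail_cons, List.zip_cons_cons, List.any_cons]
      have := ih hnd.of_cons
      simp only [List.tail_cons] at this
      simp [hab, this]

-- ===== VERDICT (by name: the statement is the Claim_ definition above) =====
theorem normalize_bundle_group_ids_spec : Claim_equal_normalize_bundle_group_ids := by
  intro g raw _ hpre
  unfold Spec_normalize_bundle_group_ids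
  match raw with
  | none => rfl
  | some xs =>
    obtain ⟨hne, hpos, hnd, hmem⟩ := hpre xs (by simp)
    have hloop := pvA_loop_ok xs [] PySem.Set.empty hpos hnd (by intro x _; rfl)
    have hofl : PySem.Set.ofList xs = xs := PySem.Set.ofList_eq_self_of_nodup xs hnd
    have hfold : List.foldl PySem.Set.add PySem.Set.empty xs = xs := by
      rw [show PySem.Set.empty = ([] : PySem.Set Int) from rfl,
        ← PySem.Set.ofList_eq_foldl, hofl]
    have hordnd : (PySem.List.sorted xs (fun x => x) false).Nodup :=
      (PySem.List.sorted_perm xs (fun x => x) false).nodup_iff.mpr hnd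
    simp only [normalize_bundle_group_ids, normalize_bundle_group_ids_alt, hloop,
      pvB_mapM_ok xs hpos, hfold]
    simp [hne, zip_tail_no_dup _ hordnd, List.contains_eq_mem, hmem]
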